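-- pv_equiv track=rewrite | github.com/rossica/wordle_tool | wordle_tool.py | words_containing_letter_stats
-- ===== SOURCE A (Python) =====
-- def words_containing_letter_stats(words):
--     """
--     Returns a list of 26 numbers counting the number of words that contain the letter at that index.
--     (0=A, 25=Z)
--     """
--     letters = [0] * 26
--     for word in words:
--         seen = set()
--         for c in word:
--             if c not in seen:
--                 letters[ord(c) - ord('A')] +=  1
--                 seen.add(c)
--     return letters
-- ===== SOURCE B (Python) =====
-- def words_containing_letter_stats(words):
--     """
--     Returns a list of 26 numbers counting the number of words that contain the letter at that index.
--     (0=A, 25=Z)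
--
--     Sort-then-scan: flatten every word's distinct letters into one pool, sort
--     the pool, then walk it once scattering each run of equal letters at once.
--     """
--     pool = sorted(c for w in words for c in set(w))
--     letters = [0] * 26
--     i = 0
--     n = len(pool)
--     while i < n:
--         j = i
--         while j < n and pool[j] == pool[i]:
--             j += 1
--         letters[ord(pool[i]) - ord('A')] += j - i
--         i = j
--     return letters
-- ===== Notes on version B (the rewrite author's own statement) =====
-- stated objective: alternative
-- what changed: A's fused word-major loop (per-word seen-set, one increment per fresh letter) is replaced by a sort-then-scan: all per-word distinct letters are flattened into a single pool, the pool is sorted, and a two-pointer run-length scan scatters each run's length into the 26 slots in one step.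
import Mathlib
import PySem

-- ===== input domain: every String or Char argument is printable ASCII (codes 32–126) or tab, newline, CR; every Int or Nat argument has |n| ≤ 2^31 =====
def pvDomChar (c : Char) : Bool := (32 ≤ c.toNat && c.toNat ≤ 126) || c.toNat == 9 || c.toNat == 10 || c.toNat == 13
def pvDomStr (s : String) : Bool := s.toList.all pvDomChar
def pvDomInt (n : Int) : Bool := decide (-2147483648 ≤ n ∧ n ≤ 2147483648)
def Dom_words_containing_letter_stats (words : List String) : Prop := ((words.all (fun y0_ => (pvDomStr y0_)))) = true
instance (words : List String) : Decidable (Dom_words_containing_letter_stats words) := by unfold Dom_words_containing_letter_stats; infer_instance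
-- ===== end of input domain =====

-- B replaces A's fused word-major loop (per-word seen-set, one increment per fresh letter) by a sort-then-scan:
-- all per-word distinct letters are flattened into one pool, the pool is sorted, and a run-length scan scatters
-- each run of equal letters into the 26 slots at once (objective: alternative; same return value on Pre_).

-- letters[i] += n (Python list index: negative wraps; out of range = IndexError, excluded by Pre_, where pySetD/pyGetD give no-op/default)
def pvBump (l : List Int) (i : Int) (n : Int) : List Int :=
  PySem.List.pySetD l i (PySem.List.pyGetD l i 0 + n)

-- ===== PORT A =====
def words_containing_letter_stats (words : List String) : List Int :=
  words.foldl
    (fun letters word =>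
      (word.toList.foldl
        (fun (st : List Int × PySem.Set Char) c =>
          if PySem.Set.contains st.2 c then st
          else (pvBump st.1 ((c.toNat : Int) - 65) 1, PySem.Set.add st.2 c))
        (letters, PySem.Set.empty)).1)
    (List.replicate 26 0)

-- ===== PORT B =====
-- inner while:  j = i; while j < n and pool[j] == pool[i]: j += 1   (c stands for pool[i])
def pvRun (pool : List Char) (c : Char) (j : Nat) : Nat :=
  if h : j < pool.length then
    if pool[j] = c then pvRun pool c (j + 1) else j
  else j
termination_by pool.length - j

lemma pvRun_ge (pool : List Char) (c : Char) (j : Nat) : j ≤ pvRun pool c j := by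
  unfold pvRun
  split_ifs with h hc
  · have := pvRun_ge pool c (j + 1)
    omega
  · exact le_refl j
  · exact le_refl j
termination_by pool.length - j

-- outer while over the sorted pool, scattering each run's length
-- j = pvRun pool pool[i] i is the inner while's exit index, inlined
def pvLoop (pool : List Char) (letters : List Int) (i : Nat) : List Int :=
  if h : i < pool.length then
    pvLoop pool
      (pvBump letters ((pool[i].toNat : Int) - 65)
        ((pvRun pool pool[i] i : Int) - (i : Int)))
      (pvRun pool pool[i] i)
  else letters
termination_by pool.length - i
decreasing_by
  have h1 : i + 1 ≤ pvRun pool pool[i] (i + 1) := pvRun_ge _ _ _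
  have h2 : pvRun pool pool[i] i = pvRun pool pool[i] (i + 1) := by
    rw [pvRun, dif_pos h, if_pos rfl]
  omega

def words_containing_letter_stats_alt (words : List String) : List Int :=
  let pool : List Char :=
    PySem.List.sorted (words.flatMap (fun w => PySem.Set.ofList w.toList)) (fun c => c) false
  pvLoop pool (List.replicate 26 0) 0

-- ===== PRECONDITION & SPEC =====
-- Pre_ admits exactly the inputs on which the Python A returns: every character must have code 39..90
-- (codes 65..90 index A..Z directly, codes 39..64 land in a slot via Python's negative-index wraparound);
-- on any other character A (and B alike) raises IndexError.
def Pre_words_containing_letter_stats (words : List String) : Prop :=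
  (words.all (fun w => w.toList.all (fun c => 39 ≤ c.toNat && c.toNat ≤ 90))) = true
instance (words : List String) : Decidable (Pre_words_containing_letter_stats words) := by
  unfold Pre_words_containing_letter_stats; infer_instance
def pvWitness_words_containing_letter_stats : List String := ["AB", "ZA", "0@'"]

def Spec_words_containing_letter_stats (words : List String) (out : List Int) : Prop := out = words_containing_letter_stats_alt words
instance (words : List String) (out : List Int) : Decidable (Spec_words_containing_letter_stats words out) := by unfold Spec_words_containing_letter_stats; infer_instance

-- ===== CLAIM (what is proved, stated in full; the proofs are below) =====
def Claim_equal_words_containing_letter_stats : Prop := ∀ (words : List String), Dom_words_containing_letter_stats words → Pre_words_containing_letter_stats words → Spec_words_containing_letter_stats words (words_containing_letter_stats words)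

-- ===== LEMMAS AND PROOFS =====

-- one element scattered with multiplicity 1
def pvStep (l : List Int) (c : Char) : List Int := pvBump l ((c.toNat : Int) - 65) 1

def pvSlot (c : Char) : Nat := if 65 ≤ c.toNat then c.toNat - 65 else c.toNat - 39

lemma pvBump_length (l : List Int) (i n : Int) : (pvBump l i n).length = l.length := by
  simp [pvBump, PySem.List.length_pySetD]

lemma pvBump_eq_set (l : List Int) (c : Char) (n : Int) (hl : l.length = 26)
    (hc : 39 ≤ c.toNat ∧ c.toNat ≤ 90) :
    pvBump l ((c.toNat : Int) - 65) n = l.set (pvSlot c) (l.getD (pvSlot c) 0 + n) := by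
  have hs : PySem.List.pyIdx? l.length ((c.toNat : Int) - 65) = some (pvSlot c) := by
    simp only [PySem.List.pyIdx?, pvSlot, hl]
    by_cases h : 65 ≤ c.toNat
    · rw [if_pos (by omega), if_pos (by push_cast; omega), if_pos h]
      congr 1; omega
    · rw [if_neg (by omega), if_pos (by push_cast; omega), if_neg (by omega)]
      congr 1; omega
  have hj : pvSlot c < 26 := by simp only [pvSlot]; split <;> omega
  simp only [pvBump, PySem.List.pySetD, PySem.List.pySet?, PySem.List.pyGetD,
    PySem.List.pyGet?, hs, Option.bind, Option.map]
  simp [Option.getD, List.getD_eq_getElem?_getD]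

lemma pvBump_getD (l : List Int) (c : Char) (n : Int) (hl : l.length = 26)
    (hc : 39 ≤ c.toNat ∧ c.toNat ≤ 90) (i : Nat) (hi : i < 26) :
    (pvBump l ((c.toNat : Int) - 65) n).getD i 0
      = l.getD i 0 + (if pvSlot c = i then n else 0) := by
  have hj : pvSlot c < 26 := by simp only [pvSlot]; split <;> omega
  rw [pvBump_eq_set l c n hl hc]
  by_cases h : pvSlot c = i
  · subst h
    simp [List.getD_eq_getElem?_getD, hl, hj]
  · simp [List.getD_eq_getElem?_getD, List.getElem?_set_ne h, h]

-- pvBump at the same index twice collapses to one pvBump of the sum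
lemma pvBump_add (l : List Int) (x : Int) (a b : Int) :
    pvBump (pvBump l x a) x b = pvBump l x (a + b) := by
  cases hs : PySem.List.pyIdx? l.length x with
  | none =>
      simp only [pvBump, PySem.List.pySetD, PySem.List.pySet?, hs, Option.map, Option.getD]
  | some k =>
      have hk : k < l.length := by
        simp only [PySem.List.pyIdx?] at hs
        split_ifs at hs <;> simp_all <;> omega
      simp only [pvBump, PySem.List.pySetD, PySem.List.pySet?, PySem.List.pyGetD,
        PySem.List.pyGet?, hs, Option.map, Option.getD, List.length_set]
      simp [hk, List.set_set]
      ring_nf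

-- ===== the while loops as a fold over the pool =====
lemma pvRun_fold (pool : List Char) (c : Char) (j : Nat) (l : List Int) (a : Int) :
    (pool.drop j).foldl pvStep (pvBump l ((c.toNat : Int) - 65) a)
      = (pool.drop (pvRun pool c j)).foldl pvStep
          (pvBump l ((c.toNat : Int) - 65) (a + ((pvRun pool c j : Int) - (j : Int)))) := by
  rw [pvRun]
  split_ifs with h hc
  · rw [List.drop_eq_getElem_cons h, List.foldl_cons]
    have hstep : pvStep (pvBump l ((c.toNat : Int) - 65) a) pool[j]
        = pvBump l ((c.toNat : Int) - 65) (a + 1) := by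
      rw [hc]; exact pvBump_add l _ a 1
    rw [hstep, pvRun_fold pool c (j + 1) l (a + 1)]
    have : a + 1 + ((pvRun pool c (j + 1) : Int) - ((j + 1 : Nat) : Int))
        = a + ((pvRun pool c (j + 1) : Int) - (j : Int)) := by push_cast; ring
    rw [this]
  · simp
  · simp
termination_by pool.length - j

lemma pvLoop_eq (pool : List Char) (i : Nat) (l : List Int) :
    pvLoop pool l i = (pool.drop i).foldl pvStep l := by
  rw [pvLoop.eq_def]
  split_ifs with h
  · have hj1 : pvRun pool pool[i] i = pvRun pool pool[i] (i + 1) := by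
      rw [pvRun, dif_pos h, if_pos rfl]
    have hge : i + 1 ≤ pvRun pool pool[i] (i + 1) := pvRun_ge _ _ _
    rw [pvLoop_eq pool (pvRun pool pool[i] i) _]
    rw [List.drop_eq_getElem_cons h, List.foldl_cons]
    have hstep : pvStep l pool[i] = pvBump l ((pool[i].toNat : Int) - 65) 1 := rfl
    rw [hstep, pvRun_fold pool pool[i] (i + 1) l 1, ← hj1]
    congr 1
    have : (1 : Int) + ((pvRun pool pool[i] i : Int) - ((i + 1 : Nat) : Int))
        = (pvRun pool pool[i] i : Int) - (i : Int) := by push_cast; ring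
    rw [this]
  · have hle : pool.length ≤ i := Nat.le_of_not_lt h
    rw [List.drop_eq_nil_of_le hle]
    rfl
termination_by pool.length - i
decreasing_by omega

-- ===== a char fold characterised slot-wise =====
lemma pvFold_length (cs : List Char) : ∀ l : List Int, (cs.foldl pvStep l).length = l.length := by
  induction cs with
  | nil => intro l; rfl
  | cons c cs ih => intro l; rw [List.foldl_cons]; rw [ih]; exact pvBump_length l _ 1

lemma pvFold_getD (cs : List Char) : ∀ l : List Int, l.length = 26 →
    (∀ c ∈ cs, 39 ≤ c.toNat ∧ c.toNat ≤ 90) → ∀ i : Nat, i < 26 →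
    (cs.foldl pvStep l).getD i 0
      = l.getD i 0 + (cs.countP (fun c => pvSlot c == i) : Int) := by
  induction cs with
  | nil => intro l _ _ i _; simp
  | cons c cs ih =>
      intro l hl hp i hi
      rw [List.foldl_cons]
      rw [ih _ (by simp [pvStep, pvBump_length, hl]) (fun x hx => hp x (List.mem_cons_of_mem _ hx)) i hi]
      have hg : (pvStep l c).getD i 0 = l.getD i 0 + (if pvSlot c = i then (1 : Int) else 0) :=
        pvBump_getD l c 1 hl (hp c List.mem_cons_self) i hi
      rw [hg, List.countP_cons]
      by_cases h : pvSlot c = i <;> simp [h] <;> push_cast <;> ring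

-- ===== A's fused loop rewritten as the same fold =====
def pvFresh (s : List Char) : List Char → List Char
  | [] => []
  | c :: cs => if s.contains c then pvFresh s cs else c :: pvFresh (s ++ [c]) cs

lemma pvFresh_eq_filter (cs : List Char) : ∀ s : List Char,
    pvFresh s cs = (PySem.List.dedup cs).filter (fun c => !s.contains c) := by
  induction cs with
  | nil => intro s; simp [pvFresh, PySem.List.dedup, PySem.Set.ofList]
  | cons c cs ih =>
      intro s
      have hd : PySem.List.dedup (c :: cs) = c :: PySem.Set.discard (PySem.List.dedup cs) c := by
        simp [PySem.List.dedup_eq_ofList, PySem.Set.ofList_cons]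
      rw [hd]
      by_cases hc : s.contains c
      · rw [pvFresh, if_pos hc, ih s]
        rw [List.filter_cons_of_neg (by simpa using hc), PySem.Set.discard, List.filter_filter]
        apply List.filter_congr
        intro x hx
        by_cases hxc : x = c
        · subst hxc; simpa using hc
        · simp [hxc]
      · rw [pvFresh, if_neg hc, ih (s ++ [c])]
        rw [List.filter_cons_of_pos (by simpa using hc), PySem.Set.discard, List.filter_filter]
        congr 1
        apply List.filter_congr
        intro x hx
        by_cases hxc : x = c
        · subst hxc; simp
        · simp [hxc]

lemma pvFresh_nil (cs : List Char) : pvFresh [] cs = PySem.List.dedup cs := by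
  rw [pvFresh_eq_filter]; simp

lemma pvInner (cs : List Char) : ∀ (l : List Int) (s : PySem.Set Char),
    cs.foldl
      (fun (st : List Int × PySem.Set Char) c =>
        if PySem.Set.contains st.2 c then st
        else (pvBump st.1 ((c.toNat : Int) - 65) 1, PySem.Set.add st.2 c))
      (l, s)
    = ((pvFresh s cs).foldl pvStep l, PySem.Set.update s cs) := by
  induction cs with
  | nil => intro l s; rfl
  | cons c cs ih =>
      intro l s
      rw [List.foldl_cons]
      by_cases hc : List.contains s c
      · have hm : c ∈ s := by simpa using hc
        rw [if_pos (by simpa [PySem.Set.contains] using hc)]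
        rw [ih l s, pvFresh, if_pos hc, PySem.Set.update_cons, PySem.Set.add_of_mem hm]
      · have hm : c ∉ s := by simpa using hc
        rw [if_neg (by simpa [PySem.Set.contains] using hc)]
        rw [ih _ _, pvFresh, if_neg hc, PySem.Set.update_cons, PySem.Set.add_of_not_mem hm,
          List.foldl_cons]
        rfl

lemma pvA_eq (words : List String) :
    words_containing_letter_stats words
      = words.foldl (fun l w => (PySem.List.dedup w.toList).foldl pvStep l)
          (List.replicate 26 0) := by
  unfold words_containing_letter_stats
  congr 1
  funext l w
  rw [pvInner]
  have : PySem.Set.empty = ([] : List Char) := rfl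
  rw [this, pvFresh_nil]

lemma pvA_flat (ws : List String) : ∀ l : List Int,
    ws.foldl (fun l w => (PySem.List.dedup w.toList).foldl pvStep l) l
      = (ws.flatMap (fun w => PySem.List.dedup w.toList)).foldl pvStep l := by
  induction ws with
  | nil => intro l; rfl
  | cons w ws ih => intro l; rw [List.foldl_cons, List.flatMap_cons, List.foldl_append, ih]

theorem pvMain (words : List String)
    (hp : ∀ w ∈ words, ∀ c ∈ w.toList, 39 ≤ c.toNat ∧ c.toNat ≤ 90) :
    words_containing_letter_stats words = words_containing_letter_stats_alt words := by
  have hflat : ∀ c ∈ words.flatMap (fun w => PySem.List.dedup w.toList),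
      39 ≤ c.toNat ∧ c.toNat ≤ 90 := by
    intro c hc
    rcases List.mem_flatMap.1 hc with ⟨w, hw, hcw⟩
    exact hp w hw c ((PySem.List.mem_dedup _ _).1 hcw)
  have hBpool : words_containing_letter_stats_alt words
      = (PySem.List.sorted (words.flatMap (fun w => PySem.Set.ofList w.toList))
          (fun c => c) false).foldl pvStep (List.replicate 26 0) := by
    unfold words_containing_letter_stats_alt
    rw [pvLoop_eq]
    rfl
  have hperm : (PySem.List.sorted (words.flatMap (fun w => PySem.Set.ofList w.toList))
      (fun c => c) false).Perm (words.flatMap (fun w => PySem.List.dedup w.toList)) := by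
    have := PySem.List.sorted_perm (words.flatMap (fun w => PySem.Set.ofList w.toList))
      (fun c : Char => c) false
    simpa [PySem.List.dedup_eq_ofList] using this
  have hpoolchars : ∀ c ∈ PySem.List.sorted (words.flatMap (fun w => PySem.Set.ofList w.toList))
      (fun c => c) false, 39 ≤ c.toNat ∧ c.toNat ≤ 90 := by
    intro c hc
    exact hflat c (hperm.mem_iff.1 hc)
  have hA : words_containing_letter_stats words
      = (words.flatMap (fun w => PySem.List.dedup w.toList)).foldl pvStep
          (List.replicate 26 0) := by
    rw [pvA_eq, pvA_flat]
  have hlenA : (words_containing_letter_stats words).length = 26 := by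
    rw [hA, pvFold_length]; simp
  have hlenB : (words_containing_letter_stats_alt words).length = 26 := by
    rw [hBpool, pvFold_length]; simp
  apply List.ext_getElem (by rw [hlenA, hlenB])
  intro i h1 h2
  have hi : i < 26 := by omega
  rw [← List.getD_eq_getElem _ 0 h1, ← List.getD_eq_getElem _ 0 h2]
  rw [hA, hBpool]
  rw [pvFold_getD _ _ (by simp) hflat i hi, pvFold_getD _ _ (by simp) hpoolchars i hi]
  rw [hperm.countP_eq]

-- ===== VERDICT (by name: the statement is the Claim_ definition above) =====
theorem words_containing_letter_stats_spec : Claim_equal_words_containing_letter_stats := by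
  intro words _ hpre
  unfold Spec_words_containing_letter_stats
  apply pvMain
  unfold Pre_words_containing_letter_stats at hpre
  simpa [List.all_eq_true, decide_eq_true_eq] using hpre
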